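-- pv_equiv track=rewrite | github.com/aws/aws-sam-cli | samcli/hook_packages/terraform/hooks/prepare/hook.py | _get_parent_modules
-- ===== SOURCE A (Python) =====
-- from typing import Any, Callable, Dict, List, Optional, Tuple, Union
--
-- def _get_parent_modules(module_address: Optional[str]) -> List[str]:
--     """
--     Convert an a full Terraform resource address to a list of module
--     addresses from the root module to the current module
--
--     e.g. "module.level1_lambda.module.level2_lambda" as input will return
--     ["module.level1_lambda", "module.level1_lambda.module.level2_lambda"]
--
--     Parameters
--     ----------
--     module_address: str
--        Full address of the Terraform module
--
--     Returns
--     -------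
--     List[str]
--        List of module addresses starting from the root module to the current module
--     """
--     if not module_address:
--         return []
--
--     # Split the address on "." then combine it back with the "module" prefix for each module name
--     modules = module_address.split(".")
--     modules = [".".join(modules[i : i + 2]) for i in range(0, len(modules), 2)]
--
--     if not modules:
--         # The format of the address was somehow different than we expected from the
--         # module.<name>.module.<child_module_name>
--         return []
--
--     # Prefix each nested module name with the previous
--     previous_module = modules[0]
--     full_path_modules = [previous_module]
--     for module in modules[1:]:
--         module = previous_module + "." + module
--         previous_module = module
--         full_path_modules.append(module)
--     return full_path_modules
-- ===== SOURCE B (Python) =====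
-- def _get_parent_modules(module_address):
--     if not module_address:
--         return []
--     tokens = module_address.split(".")
--     n = len(tokens)
--     return [".".join(tokens[:min(i, n)]) for i in range(2, n + 2, 2)]
-- ===== Notes on version B (the rewrite author's own statement) =====
-- stated objective: simpler
-- what changed: Each cumulative parent path is computed directly as a dot-joined prefix slice of the token list indexed by an even-step range, replacing A's pair-building intermediate list, its emptiness re-check and its previous_module accumulator loop.
import Mathlib
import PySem

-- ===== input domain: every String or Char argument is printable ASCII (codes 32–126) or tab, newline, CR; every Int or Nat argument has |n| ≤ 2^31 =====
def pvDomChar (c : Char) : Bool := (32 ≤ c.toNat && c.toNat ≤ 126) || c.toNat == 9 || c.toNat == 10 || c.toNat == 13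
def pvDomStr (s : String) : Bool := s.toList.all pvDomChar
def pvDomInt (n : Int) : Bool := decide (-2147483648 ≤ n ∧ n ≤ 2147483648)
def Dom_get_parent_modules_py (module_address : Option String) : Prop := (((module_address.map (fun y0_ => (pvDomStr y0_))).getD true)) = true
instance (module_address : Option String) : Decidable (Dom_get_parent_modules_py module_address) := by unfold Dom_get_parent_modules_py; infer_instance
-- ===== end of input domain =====

-- B computes each cumulative parent path directly as a dot-joined prefix slice of the token
-- list, dropping A's pair-building intermediate list and previous_module accumulator (simpler).

-- ===== PORT A =====
-- [".".join(modules[i : i + 2]) for i in range(0, len(modules), 2)]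
def pvPairsA (modules : List String) : List String :=
  (PySem.List.pyRange 0 (modules.length : Int) 2).map
    (fun i => PySem.Str.join "." (PySem.List.slice modules (some i) (some (i + 2))))

-- the 'for module in modules[1:]' loop: state = (previous_module, full_path_modules)
def pvLoopA (acc : String × List String) (rest : List String) : String × List String :=
  rest.foldl (fun st m =>
    let m' := st.1 ++ "." ++ m
    (m', st.2 ++ [m'])) acc

-- 'if not modules: return []' then modules[0] / modules[1:] and the loop
def pvCoreA (modules : List String) : List String :=
  match modules with
  | [] => []
  | m0 :: rest => (pvLoopA (m0, [m0]) rest).2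

def get_parent_modules_py (module_address : Option String) : List String :=
  match module_address with
  | none => []
  | some s =>
    if s = "" then []
    else pvCoreA (pvPairsA ((PySem.Str.split? s ".").getD []))
    -- split? is always 'some' here since the separator "." is nonempty

-- ===== PORT B =====
-- [".".join(tokens[:min(i, n)]) for i in range(2, n + 2, 2)]
def pvCoreB (tokens : List String) : List String :=
  (PySem.List.pyRange 2 ((tokens.length : Int) + 2) 2).map
    (fun i => PySem.Str.join "." (PySem.List.slice tokens none (some (min i (tokens.length : Int)))))

def get_parent_modules_py_alt (module_address : Option String) : List String :=
  match module_address with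
  | none => []
  | some s =>
    if s = "" then []
    else pvCoreB ((PySem.Str.split? s ".").getD [])
    -- split? is always 'some' here since the separator "." is nonempty

-- ===== PRECONDITION & SPEC =====
def Spec_get_parent_modules_py (module_address : Option String) (out : List String) : Prop := out = get_parent_modules_py_alt module_address
instance (module_address : Option String) (out : List String) : Decidable (Spec_get_parent_modules_py module_address out) := by unfold Spec_get_parent_modules_py; infer_instance

-- ===== CLAIM (what is proved, stated in full; the proofs are below) =====
def Claim_equal_get_parent_modules_py : Prop := ∀ (module_address : Option String), Dom_get_parent_modules_py module_address → Spec_get_parent_modules_py module_address (get_parent_modules_py module_address)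

-- ===== LEMMAS AND PROOFS =====

-- PySem.Str.join "." unfolds on cons-cons / singleton (String-level versions of the Chars lemmas)
lemma join_dot_cons_cons (p q : String) (r : List String) :
    PySem.Str.join "." (p :: q :: r) = p ++ "." ++ PySem.Str.join "." (q :: r) := by
  apply String.toList_inj.mp
  simp [PySem.Str.toList_join, PySem.Chars.join_cons_cons, String.toList_append]

lemma join_dot_singleton (p : String) : PySem.Str.join "." [p] = p := by
  apply String.toList_inj.mp
  simp [PySem.Str.toList_join, PySem.Chars.join_singleton]

lemma join_dot_pair (a b : String) : PySem.Str.join "." [a, b] = a ++ "." ++ b := by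
  rw [join_dot_cons_cons, join_dot_singleton]

lemma join_dot_cons_cons_ne (a b : String) (l : List String) (h : l ≠ []) :
    PySem.Str.join "." (a :: b :: l) = (a ++ "." ++ b) ++ "." ++ PySem.Str.join "." l := by
  match l with
  | x :: r =>
    rw [join_dot_cons_cons, join_dot_cons_cons]
    simp [String.append_assoc]

-- the accumulator loop commutes with prefixing every state by 'H ++ "."'
lemma pvLoopA_map (rest : List String) : ∀ (H p : String) (l0 l : List String),
    pvLoopA (H ++ "." ++ p, l0 ++ l.map (fun x => H ++ "." ++ x)) rest
      = (H ++ "." ++ (pvLoopA (p, l) rest).1,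
         l0 ++ ((pvLoopA (p, l) rest).2).map (fun x => H ++ "." ++ x)) := by
  induction rest with
  | nil => intro H p l0 l; simp [pvLoopA]
  | cons m rest ih =>
    intro H p l0 l
    show pvLoopA ((H ++ "." ++ p) ++ "." ++ m,
        (l0 ++ l.map (fun x => H ++ "." ++ x)) ++ [(H ++ "." ++ p) ++ "." ++ m]) rest = _
    have h1 : (H ++ "." ++ p) ++ "." ++ m = H ++ "." ++ (p ++ "." ++ m) := by
      simp [String.append_assoc]
    have h2 : (l0 ++ l.map (fun x => H ++ "." ++ x)) ++ [(H ++ "." ++ p) ++ "." ++ m]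
        = l0 ++ (l ++ [p ++ "." ++ m]).map (fun x => H ++ "." ++ x) := by
      simp [h1]
    rw [h2, h1, ih]
    rfl

lemma pairsA_nil : pvPairsA [] = [] := by decide

lemma pairsA_single (a : String) : pvPairsA [a] = [a] := by
  have h : PySem.List.pyRange 0 ((List.length [a] : Int)) 2 = [0] := by
    simp; decide
  simp only [pvPairsA, h, List.map_cons, List.map_nil]
  rw [PySem.List.slice_toNat _ (by norm_num) (by norm_num)]
  simp [join_dot_singleton]

-- closed form of range(0, m, 2)
lemma pyRange_zero_two (m : Nat) :
    PySem.List.pyRange 0 (m : Int) 2 = (List.range ((m + 1) / 2)).map (fun k => ((2 * k : Nat) : Int)) := by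
  rw [PySem.List.pyRange_of_pos _ _ (by norm_num)]
  rcases Nat.eq_zero_or_pos m with h | h
  · subst h; simp
  · rw [if_pos (by exact_mod_cast h)]
    have hc : (((m : Int) - 0 + 2 - 1) / 2).toNat = (m + 1) / 2 := by omega
    rw [hc]
    apply List.map_congr_left
    intro k _
    push_cast
    ring

-- closed form of range(2, m + 2, 2)
lemma pyRange_two_two (m : Nat) :
    PySem.List.pyRange 2 ((m : Int) + 2) 2 = (List.range ((m + 1) / 2)).map (fun k => ((2 * k + 2 : Nat) : Int)) := by
  rw [PySem.List.pyRange_of_pos _ _ (by norm_num)]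
  rcases Nat.eq_zero_or_pos m with h | h
  · subst h; simp
  · rw [if_pos (by omega)]
    have hc : (((m : Int) + 2 - 2 + 2 - 1) / 2).toNat = (m + 1) / 2 := by omega
    rw [hc]
    apply List.map_congr_left
    intro k _
    push_cast
    ring

lemma pairsA_cons (a b : String) (ts : List String) :
    pvPairsA (a :: b :: ts) = (a ++ "." ++ b) :: pvPairsA ts := by
  unfold pvPairsA
  have hl : ((a :: b :: ts).length : Int) = ((ts.length + 2 : Nat) : Int) := by simp; ring
  rw [hl, pyRange_zero_two, pyRange_zero_two]
  have hc : (ts.length + 2 + 1) / 2 = (ts.length + 1) / 2 + 1 := by omega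
  rw [hc, List.range_succ_eq_map]
  simp only [List.map_cons, List.map_map]
  congr 1
  · -- head: i = 0 picks out [a, b]
    show PySem.Str.join "." (PySem.List.slice (a :: b :: ts) (some ((2 * 0 : Nat) : Int)) _) = _
    rw [PySem.List.slice_toNat _ (by positivity) (by positivity)]
    norm_num
    rw [show Int.toNat 2 = 2 from rfl, List.take_succ_cons, List.take_succ_cons, List.take_zero,
        join_dot_pair]
  · apply List.map_congr_left
    intro k _
    simp only [Function.comp]
    show PySem.Str.join "." (PySem.List.slice (a :: b :: ts) (some ((2 * (k + 1) : Nat) : Int)) _) = _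
    rw [PySem.List.slice_toNat _ (by positivity) (by positivity),
        PySem.List.slice_toNat _ (by positivity) (by positivity)]
    have h1 : (((2 * (k + 1) : Nat) : Int) + 2).toNat - ((2 * (k + 1) : Nat) : Int).toNat = 2 := by
      push_cast; omega
    have h2 : (((2 * k : Nat) : Int) + 2).toNat - ((2 * k : Nat) : Int).toNat = 2 := by
      push_cast; omega
    have h3 : ((2 * (k + 1) : Nat) : Int).toNat = 2 * k + 1 + 1 := by push_cast; omega
    have h4 : ((2 * k : Nat) : Int).toNat = 2 * k := by push_cast; omega
    rw [h1, h2, h3, h4, List.drop_succ_cons, List.drop_succ_cons]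

lemma coreA_cons (a b : String) (ts : List String) :
    pvCoreA (pvPairsA (a :: b :: ts))
      = (a ++ "." ++ b) :: (pvCoreA (pvPairsA ts)).map (fun x => (a ++ "." ++ b) ++ "." ++ x) := by
  rw [pairsA_cons]
  match h : pvPairsA ts with
  | [] => simp [pvCoreA, pvLoopA]
  | m0 :: rest =>
    show (pvLoopA ((a ++ "." ++ b), [a ++ "." ++ b]) (m0 :: rest)).2 = _
    have : pvLoopA ((a ++ "." ++ b), [a ++ "." ++ b]) (m0 :: rest)
        = pvLoopA ((a ++ "." ++ b) ++ "." ++ m0,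
            [a ++ "." ++ b] ++ [m0].map (fun x => (a ++ "." ++ b) ++ "." ++ x)) rest := rfl
    rw [this, pvLoopA_map]
    simp [pvCoreA, pvLoopA]

lemma coreB_nil : pvCoreB [] = [] := by decide

lemma coreB_single (a : String) : pvCoreB [a] = [a] := by
  have h : PySem.List.pyRange 2 ((List.length [a] : Int) + 2) 2 = [2] := by
    simp; decide
  simp only [pvCoreB, h, List.map_cons, List.map_nil]
  rw [PySem.List.slice_to _ (by norm_num : (0:Int) ≤ min 2 (List.length [a] : Int))]
  simp [join_dot_singleton]

lemma coreB_cons (a b : String) (ts : List String) :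
    pvCoreB (a :: b :: ts)
      = (a ++ "." ++ b) :: (pvCoreB ts).map (fun x => (a ++ "." ++ b) ++ "." ++ x) := by
  unfold pvCoreB
  have hl : ((a :: b :: ts).length : Int) = ((ts.length + 2 : Nat) : Int) := by simp; ring
  rw [hl, pyRange_two_two, pyRange_two_two]
  have hc : (ts.length + 2 + 1) / 2 = (ts.length + 1) / 2 + 1 := by omega
  rw [hc, List.range_succ_eq_map]
  simp only [List.map_cons, List.map_map]
  congr 1
  · -- head: i = 2 picks out the first two tokens
    show PySem.Str.join "." (PySem.List.slice (a :: b :: ts)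
        none (some (min ((2 * 0 + 2 : Nat) : Int) ((ts.length + 2 : Nat) : Int)))) = _
    have hm : min ((2 * 0 + 2 : Nat) : Int) ((ts.length + 2 : Nat) : Int) = ((2 : Nat) : Int) := by
      push_cast; omega
    rw [hm, PySem.List.slice_to _ (by positivity)]
    norm_num
    rw [show Int.toNat 2 = 2 from rfl, List.take_succ_cons, List.take_succ_cons, List.take_zero,
        join_dot_pair]
  · apply List.map_congr_left
    intro k hk
    have hkn : 2 * k + 1 ≤ ts.length := by
      rw [List.mem_range] at hk; omega
    simp only [Function.comp]
    show PySem.Str.join "." (PySem.List.slice (a :: b :: ts)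
        none (some (min ((2 * (k + 1) + 2 : Nat) : Int) ((ts.length + 2 : Nat) : Int)))) = _
    have hm : min ((2 * (k + 1) + 2 : Nat) : Int) ((ts.length + 2 : Nat) : Int)
        = ((min (2 * k + 2) ts.length + 2 : Nat) : Int) := by
      push_cast; omega
    have hm2 : min ((2 * k + 2 : Nat) : Int) ((ts.length : Nat) : Int)
        = ((min (2 * k + 2) ts.length : Nat) : Int) := by
      push_cast; omega
    rw [hm, hm2, PySem.List.slice_to _ (by positivity), PySem.List.slice_to _ (by positivity)]
    rw [Int.toNat_natCast, Int.toNat_natCast, List.take_succ_cons, List.take_succ_cons]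
    rw [join_dot_cons_cons_ne]
    apply List.ne_nil_of_length_pos
    rw [List.length_take]
    omega

lemma core_eq (ts : List String) : pvCoreA (pvPairsA ts) = pvCoreB ts := by
  match ts with
  | [] => rw [pairsA_nil, coreB_nil]; rfl
  | [a] => rw [pairsA_single, coreB_single]; rfl
  | a :: b :: ts => rw [coreA_cons, coreB_cons, core_eq ts]

-- ===== VERDICT (by name: the statement is the Claim_ definition above) =====
theorem get_parent_modules_py_spec : Claim_equal_get_parent_modules_py := by
  intro ma _
  unfold Spec_get_parent_modules_py get_parent_modules_py get_parent_modules_py_alt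
  match ma with
  | none => rfl
  | some s =>
    by_cases h : s = "" <;> simp [h, core_eq]
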